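-- pv_equiv track=rewrite | github.com/Ryan-Xue2/Hackathon-Project | levels.py | get_rect_size
-- ===== SOURCE A (Python) =====
-- def get_rect_size(level, row, col):
--   """
--   Find the width and height of the widest, highest rectangle
--   you can make if the top-left corner of the rectangle starts at (row, col)
--   and the rectangle can only consist of the same value.
--   """
--   # Represents the value that the rectangle will consist of
--   target_value = level[row][col]
--
--   # Initalize the width and height of the rect
--   rect_width = 0
--   rect_height = 1
--
--   # Find the maximum width of the rectangle you can make
--   for i in range(col, len(level[row])):
--     if level[row][i] != target_value:
--       break
--     rect_width += 1
--
--   # Find the maximum height of the rectangle given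
--   reached_max_height = False
--   for i in range(row+1, len(level)):
--     for j in range(col, min(len(level[i]), col+rect_width)):
--       if level[i][j] != target_value:
--         reached_max_height = True
--         break
--     if reached_max_height:
--       break
--     rect_height += 1
--
--   return rect_width, rect_height
-- ===== SOURCE B (Python) =====
-- def get_rect_size(level, row, col):
--   """Column-major re-implementation: scan the width run along the top row, then
--   for each column take the vertical run of matching cells (a row too short to
--   reach the column keeps the run going) and return 1 + the minimum run."""
--   first = level[row]
--   target = first[col]
--
--   # Width: length of the run of target values along the top row from col.
--   width = 0
--   for v in first[col:]:
--     if v != target: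
--       break
--     width += 1
--
--   # Height: minimum over the columns of the vertical run length below (row, col).
--   below = level[row+1:]
--   height = len(level) - row
--   for j in range(col, col + width):
--     run = 1
--     for r in below:
--       if j < len(r) and r[j] != target:
--         break
--       run += 1
--     if run < height:
--       height = run
--   return width, height
-- ===== Notes on version B (the rewrite author's own statement) =====
-- stated objective: alternative
-- what changed: A scans row by row with an early-break flag to grow the height; B computes, for each column of the width run, the vertical run of matching cells below (short rows keep a run going) and returns 1 + the minimum of those runs.
-- outside the precondition, e.g. on get_rect_size([[1], [1]], -2, 0): A returns (1, 4), B returns (1, 2)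
import Mathlib
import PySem

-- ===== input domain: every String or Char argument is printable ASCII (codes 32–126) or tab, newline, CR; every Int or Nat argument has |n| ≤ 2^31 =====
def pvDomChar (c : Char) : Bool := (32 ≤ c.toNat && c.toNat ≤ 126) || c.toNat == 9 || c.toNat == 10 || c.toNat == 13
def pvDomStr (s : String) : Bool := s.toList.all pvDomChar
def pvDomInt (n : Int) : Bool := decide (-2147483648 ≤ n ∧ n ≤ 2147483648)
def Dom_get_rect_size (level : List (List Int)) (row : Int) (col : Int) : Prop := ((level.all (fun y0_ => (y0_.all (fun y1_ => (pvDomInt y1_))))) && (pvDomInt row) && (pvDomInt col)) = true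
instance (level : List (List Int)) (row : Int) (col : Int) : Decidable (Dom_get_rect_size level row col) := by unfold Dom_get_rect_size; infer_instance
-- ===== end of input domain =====

-- B replaces A's row-by-row height scan with per-column vertical runs whose minimum gives the height (alternative decomposition, same cost).


-- ===== PORT A =====
-- body of A's width loop ('for i in range(col, len(level[row])):' with break modelled by a Bool flag)
def pvA_wbody (target : Int) (first : List Int) (st : Int × Bool) (i : Int) : Int × Bool :=
  if st.2 then st
  else if PySem.List.pyGetD first i 0 ≠ target then (st.1, true)
  else (st.1 + 1, st.2)

-- A's inner loop over j: returns the 'reached_max_height' flag for row i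
def pvA_inner (target : Int) (col : Int) (w : Int) (r : List Int) : Bool :=
  (PySem.List.pyRange col (min ((r.length : Int)) (col + w))).foldl
    (fun fl j => if fl then fl else decide (PySem.List.pyGetD r j 0 ≠ target)) false

-- body of A's height loop
def pvA_hbody (target : Int) (col : Int) (w : Int) (level : List (List Int)) (st : Int × Bool) (i : Int) : Int × Bool :=
  if st.2 then st
  else if pvA_inner target col w (PySem.List.pyGetD level i []) then (st.1, true)
  else (st.1 + 1, st.2)

def get_rect_size (level : List (List Int)) (row : Int) (col : Int) : Int × Int :=
  let target := PySem.List.pyGetD (PySem.List.pyGetD level row []) col 0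
  let rect_width := ((PySem.List.pyRange col (((PySem.List.pyGetD level row []).length : Int))).foldl
      (pvA_wbody target (PySem.List.pyGetD level row [])) (0, false)).1
  let rect_height := ((PySem.List.pyRange (row + 1) ((level.length : Int))).foldl
      (pvA_hbody target col rect_width level) (1, false)).1
  (rect_width, rect_height)

-- ===== PORT B =====
-- length of the run of target values at the head of the list ('for v in first[col:]' with break)
def pvRunLen (target : Int) : List Int → Int
  | [] => 0
  | v :: vs => if v ≠ target then 0 else 1 + pvRunLen target vs

-- vertical run below (row, col) at column j: rows too short to reach j keep the run going
def pvColRun (target : Int) (j : Int) : List (List Int) → Int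
  | [] => 0
  | r :: rs =>
    if j < (r.length : Int) ∧ PySem.List.pyGetD r j 0 ≠ target then 0
    else 1 + pvColRun target j rs

def get_rect_size_alt (level : List (List Int)) (row : Int) (col : Int) : Int × Int :=
  let first := PySem.List.pyGetD level row []
  let target := PySem.List.pyGetD first col 0
  let width := pvRunLen target (PySem.List.slice first (some col) none)
  let below := PySem.List.slice level (some (row + 1)) none
  let height := (PySem.List.pyRange col (col + width)).foldl
    (fun h j =>
      let run := 1 + pvColRun target j below
      if run < h then run else h)
    ((level.length : Int) - row)
  (width, height)

-- ===== PRECONDITION & SPEC =====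
-- Pre_ restricts to nonnegative in-range (row, col): the natural grid domain. With negative
-- (Python-wrapping) indices A's loops re-read wrapped rows (duplicating them in the height
-- count) and can raise IndexError on ragged grids — accidental behaviour B does not reproduce.
def Pre_get_rect_size (level : List (List Int)) (row : Int) (col : Int) : Prop :=
  0 ≤ row ∧ row < (level.length : Int) ∧ 0 ≤ col ∧ col < ((PySem.List.pyGetD level row []).length : Int)
instance (level : List (List Int)) (row : Int) (col : Int) : Decidable (Pre_get_rect_size level row col) := by unfold Pre_get_rect_size; infer_instance

def pvWitness_get_rect_size : List (List Int) × Int × Int := ([[1, 1, 2], [1, 0, 1]], 0, 0)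

def Spec_get_rect_size (level : List (List Int)) (row : Int) (col : Int) (out : Int × Int) : Prop := out = get_rect_size_alt level row col
instance (level : List (List Int)) (row : Int) (col : Int) (out : Int × Int) : Decidable (Spec_get_rect_size level row col out) := by unfold Spec_get_rect_size; infer_instance

-- ===== CLAIM (what is proved, stated in full; the proofs are below) =====
def Claim_equal_get_rect_size : Prop := ∀ (level : List (List Int)) (row : Int) (col : Int), Dom_get_rect_size level row col → Pre_get_rect_size level row col → Spec_get_rect_size level row col (get_rect_size level row col)

-- ===== LEMMAS AND PROOFS =====

-- width-loop step on the row value itself (pvA_wbody with the lookup factored out)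
def pvWStep (target : Int) (st : Int × Bool) (v : Int) : Int × Bool :=
  if st.2 then st
  else if v ≠ target then (st.1, true)
  else (st.1 + 1, st.2)

-- height-loop step on the row itself
def pvHStep (target col w : Int) (st : Int × Bool) (r : List Int) : Int × Bool :=
  if st.2 then st
  else if pvA_inner target col w r then (st.1, true)
  else (st.1 + 1, st.2)

-- number of leading rows A accepts before 'reached_max_height'
def pvHPrefix (target col w : Int) : List (List Int) → Int
  | [] => 0
  | r :: rs => if pvA_inner target col w r then 0 else 1 + pvHPrefix target col w rs

theorem pvWfold_sticky (t : Int) : ∀ (xs : List Int) (w : Int), xs.foldl (pvWStep t) (w, true) = (w, true) := by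
  intro xs
  induction xs with
  | nil => intro w; rfl
  | cons v vs ih =>
    intro w
    have h1 : List.foldl (pvWStep t) (w, true) (v :: vs) = List.foldl (pvWStep t) (w, true) vs := by
      simp [pvWStep]
    rw [h1, ih]

theorem pvWfold_run (t : Int) : ∀ (xs : List Int) (w : Int),
    (xs.foldl (pvWStep t) (w, false)).1 = w + pvRunLen t xs := by
  intro xs
  induction xs with
  | nil => intro w; simp [pvRunLen]
  | cons v vs ih =>
    intro w
    by_cases h : v = t
    · have h1 : List.foldl (pvWStep t) (w, false) (v :: vs) = List.foldl (pvWStep t) (w + 1, false) vs := by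
        simp [pvWStep, h]
      rw [h1, ih]
      simp [pvRunLen, h]
      omega
    · have h1 : List.foldl (pvWStep t) (w, false) (v :: vs) = List.foldl (pvWStep t) (w, true) vs := by
        simp [pvWStep, h]
      rw [h1, pvWfold_sticky t vs w]
      simp [pvRunLen, h]

theorem pvHfold_sticky (t col w : Int) : ∀ (xs : List (List Int)) (hh : Int), xs.foldl (pvHStep t col w) (hh, true) = (hh, true) := by
  intro xs
  induction xs with
  | nil => intro hh; rfl
  | cons r rs ih =>
    intro hh
    have h1 : List.foldl (pvHStep t col w) (hh, true) (r :: rs) = List.foldl (pvHStep t col w) (hh, true) rs := by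
      simp [pvHStep]
    rw [h1, ih]

theorem pvHfold_run (t col w : Int) : ∀ (xs : List (List Int)) (hh : Int),
    (xs.foldl (pvHStep t col w) (hh, false)).1 = hh + pvHPrefix t col w xs := by
  intro xs
  induction xs with
  | nil => intro hh; simp [pvHPrefix]
  | cons r rs ih =>
    intro hh
    by_cases h : pvA_inner t col w r
    · have h1 : List.foldl (pvHStep t col w) (hh, false) (r :: rs) = List.foldl (pvHStep t col w) (hh, true) rs := by
        simp [pvHStep, h]
      rw [h1, pvHfold_sticky t col w rs hh]
      simp [pvHPrefix, h]
    · have h1 : List.foldl (pvHStep t col w) (hh, false) (r :: rs) = List.foldl (pvHStep t col w) (hh + 1, false) rs := by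
        simp [pvHStep, h]
      rw [h1, ih]
      simp [pvHPrefix, h]
      omega

theorem pvFoldl_flag_any (p : Int → Bool) : ∀ (js : List Int) (fl : Bool),
    js.foldl (fun fl j => if fl then fl else p j) fl = (fl || js.any p) := by
  intro js
  induction js with
  | nil => intro fl; simp
  | cons j js ih =>
    intro fl
    cases fl
    · simp [ih]
    · simp [ih]

theorem pvInner_iff (t col w : Int) (r : List Int) :
    pvA_inner t col w r = true ↔
      ∃ j : Int, col ≤ j ∧ j < col + w ∧ j < (r.length : Int) ∧ PySem.List.pyGetD r j 0 ≠ t := by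
  unfold pvA_inner
  rw [pvFoldl_flag_any]
  simp only [Bool.false_or, List.any_eq_true]
  constructor
  · rintro ⟨j, hj, hbad⟩
    rw [PySem.List.mem_pyRange_one] at hj
    exact ⟨j, hj.1, by omega, by omega, by simpa using hbad⟩
  · rintro ⟨j, h1, h2, h3, h4⟩
    exact ⟨j, PySem.List.mem_pyRange_one.mpr ⟨h1, by omega⟩, by simpa using h4⟩

theorem pvColRun_nonneg (t j : Int) : ∀ (rows : List (List Int)), 0 ≤ pvColRun t j rows := by
  intro rows
  induction rows with
  | nil => simp [pvColRun]
  | cons r rs ih =>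
    by_cases h : j < (r.length : Int) ∧ PySem.List.pyGetD r j 0 ≠ t
    · simp [pvColRun, h]
    · simp [pvColRun, h]; omega

theorem pvFoldl_min_shift (c c' : Int → Int) : ∀ (js : List Int) (init : Int),
    (∀ j ∈ js, c' j = c j + 1) →
    js.foldl (fun h j => if c' j < h then c' j else h) (init + 1)
      = js.foldl (fun h j => if c j < h then c j else h) init + 1 := by
  intro js
  induction js with
  | nil => intro init _; rfl
  | cons j js ih =>
    intro init hc
    have hj := hc j (by simp)
    have h1 : (if c' j < init + 1 then c' j else init + 1) = (if c j < init then c j else init) + 1 := by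
      rw [hj]; split_ifs <;> omega
    simp only [List.foldl_cons, h1]
    exact ih _ (fun x hx => hc x (by simp [hx]))

theorem pvFoldl_min_lb (c : Int → Int) (m : Int) : ∀ (js : List Int) (init : Int),
    m ≤ init → (∀ j ∈ js, m ≤ c j) →
    m ≤ js.foldl (fun h j => if c j < h then c j else h) init := by
  intro js
  induction js with
  | nil => intro init h _; simpa using h
  | cons j js ih =>
    intro init h hc
    simp only [List.foldl_cons]
    refine ih _ ?_ (fun x hx => hc x (by simp [hx]))
    have := hc j (by simp)
    split_ifs <;> omega

theorem pvFoldl_min_le_init (c : Int → Int) : ∀ (js : List Int) (init : Int),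
    js.foldl (fun h j => if c j < h then c j else h) init ≤ init := by
  intro js
  induction js with
  | nil => intro init; simp
  | cons j js ih =>
    intro init
    simp only [List.foldl_cons]
    have := ih (if c j < init then c j else init)
    split_ifs at * <;> omega

theorem pvFoldl_min_le_mem (c : Int → Int) : ∀ (js : List Int) (init j0 : Int), j0 ∈ js →
    js.foldl (fun h j => if c j < h then c j else h) init ≤ c j0 := by
  intro js
  induction js with
  | nil => intro init j0 h; simp at h
  | cons j js ih =>
    intro init j0 h
    rcases List.mem_cons.mp h with h | h
    · subst h
      simp only [List.foldl_cons]
      have := pvFoldl_min_le_init c js (if c j0 < init then c j0 else init)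
      split_ifs at * <;> omega
    · simp only [List.foldl_cons]
      exact ih _ j0 h

theorem pvKey (t col w : Int) : ∀ (rows : List (List Int)),
    (PySem.List.pyRange col (col + w)).foldl
        (fun h j => if 1 + pvColRun t j rows < h then 1 + pvColRun t j rows else h)
        ((rows.length : Int) + 1)
      = 1 + pvHPrefix t col w rows := by
  intro rows
  induction rows with
  | nil =>
    have hub := pvFoldl_min_le_init (fun j => 1 + pvColRun t j ([] : List (List Int))) (PySem.List.pyRange col (col + w)) 1
    have hlb := pvFoldl_min_lb (fun j => 1 + pvColRun t j ([] : List (List Int))) 1 (PySem.List.pyRange col (col + w)) 1 le_rfl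
      (by intro j _; simp [pvColRun])
    beta_reduce at hub hlb
    simp only [List.length_nil, Nat.cast_zero, zero_add, pvHPrefix]
    omega
  | cons r rs ih =>
    by_cases h : pvA_inner t col w r
    · obtain ⟨j0, h1, h2, h3, h4⟩ := (pvInner_iff t col w r).mp h
      have hc0 : 1 + pvColRun t j0 (r :: rs) = 1 := by simp [pvColRun, h3, h4]
      have hub := pvFoldl_min_le_mem (fun j => 1 + pvColRun t j (r :: rs)) (PySem.List.pyRange col (col + w))
        (((r :: rs).length : Int) + 1) j0 (PySem.List.mem_pyRange_one.mpr ⟨h1, h2⟩)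
      have hlb := pvFoldl_min_lb (fun j => 1 + pvColRun t j (r :: rs)) 1 (PySem.List.pyRange col (col + w))
        (((r :: rs).length : Int) + 1) (by omega)
        (by intro j _; beta_reduce; have := pvColRun_nonneg t j (r :: rs); omega)
      beta_reduce at hub hlb
      rw [hc0] at hub
      rw [show pvHPrefix t col w (r :: rs) = 0 from by simp [pvHPrefix, h]]
      omega
    · have hgood : ∀ j ∈ PySem.List.pyRange col (col + w), 1 + pvColRun t j (r :: rs) = (1 + pvColRun t j rs) + 1 := by
        intro j hj
        rw [PySem.List.mem_pyRange_one] at hj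
        have hnb : ¬(j < (r.length : Int) ∧ PySem.List.pyGetD r j 0 ≠ t) := by
          intro hb
          exact h ((pvInner_iff t col w r).mpr ⟨j, hj.1, hj.2, hb.1, hb.2⟩)
        simp [pvColRun, hnb]
        omega
      have hlen : ((r :: rs).length : Int) + 1 = ((rs.length : Int) + 1) + 1 := by
        simp only [List.length_cons]; push_cast; omega
      rw [hlen, pvFoldl_min_shift (fun j => 1 + pvColRun t j rs) (fun j => 1 + pvColRun t j (r :: rs)) _ _ hgood, ih]
      rw [show pvHPrefix t col w (r :: rs) = 1 + pvHPrefix t col w rs from by simp [pvHPrefix, h]]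
      omega

-- ===== VERDICT (by name: the statement is the Claim_ definition above) =====

theorem get_rect_size_spec : Claim_equal_get_rect_size := by
  intro level row col hdom hpre
  obtain ⟨hr0, hr1, hc0, hc1⟩ := hpre
  unfold Spec_get_rect_size
  simp only [get_rect_size, get_rect_size_alt]
  set first := PySem.List.pyGetD level row [] with hfirst
  set t := PySem.List.pyGetD first col 0 with ht
  have hwA : ((PySem.List.pyRange col ((first.length : Int))).foldl (pvA_wbody t first) (0, false)).1
      = pvRunLen t (first.drop col.toNat) := by
    have hb : pvA_wbody t first = fun st i => pvWStep t st (PySem.List.pyGetD first i 0) := rfl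
    rw [hb, PySem.List.foldl_pyRange_pyGetD' first 0 (pvWStep t) (0, false) hc0, pvWfold_run]
    omega
  have hslice : PySem.List.slice first (some col) none = first.drop col.toNat := by
    have := PySem.List.slice_from_natCast first col.toNat
    rwa [Int.toNat_of_nonneg hc0] at this
  rw [hwA, hslice]
  set w := pvRunLen t (first.drop col.toNat) with hw
  have hbelow : PySem.List.slice level (some (row + 1)) none = level.drop (row + 1).toNat := by
    have := PySem.List.slice_from_natCast level (row + 1).toNat
    rwa [Int.toNat_of_nonneg (by omega : (0:Int) ≤ row + 1)] at this
  rw [hbelow]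
  set rows := level.drop (row + 1).toNat with hrows
  have hhA : ((PySem.List.pyRange (row + 1) ((level.length : Int))).foldl (pvA_hbody t col w level) (1, false)).1
      = 1 + pvHPrefix t col w rows := by
    have hb : pvA_hbody t col w level = fun st i => pvHStep t col w st (PySem.List.pyGetD level i []) := rfl
    rw [hb, PySem.List.foldl_pyRange_pyGetD' level [] (pvHStep t col w) (1, false)
      (by omega : (0:Int) ≤ row + 1), pvHfold_run]
  have hinit : (level.length : Int) - row = ((rows.length : Int) + 1) := by
    rw [hrows]
    simp only [List.length_drop]
    omega
  rw [hhA, hinit, pvKey t col w rows]
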